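-- pv_equiv track=rewrite | github.com/alaaboubrima/Table-des-Suffixes | code.py | recherche_occurrences
-- ===== SOURCE A (Python) =====
-- def table_suffix(text):
--     # Créer la table des suffixes à partir du texte donné
--     suffix_table = []
--     for i in range(len(text)):
--         suffix_table.append((text[i:], i))
--     suffix_table.sort()
--     return suffix_table
--
-- def recherche_occurrences(T, M):
--     exist = False
--     n = len(T)
--     TS = table_suffix(T) # table des suffixes triée
--     d, f = 0, n-1
--     while d < f:
--         milieu = (d + f) // 2
--         if M <= T[TS[milieu][1]:]:
--             f = milieu
--         else:
--             d = milieu + 1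
--     deb = d
--     f = n - 1
--     lg = len(M)
--     while d < f:
--         milieu = (d + f) // 2
--         if M == T[TS[milieu][1]:TS[milieu][1]+lg]:
--             exist = True
--             d = milieu + 1
--         else:
--             f = milieu - 1
--     fin = f
--     return TS[deb:fin+1], exist
-- ===== SOURCE B (Python) =====
-- def recherche_occurrences(T, M):
--     n = len(T)
--     lg = len(M)
--     # suffix table kept sorted by insertion; suffix strings built incrementally right-to-left
--     TS = []
--     s = ""
--     for i in range(n - 1, -1, -1):
--         s = T[i] + s
--         lo, hi = 0, len(TS)
--         while lo < hi:
--             mid = (lo + hi) // 2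
--             if TS[mid][0] < s:
--                 lo = mid + 1
--             else:
--                 hi = mid
--         TS.insert(lo, (s, i))
--
--     def lower(d, f):
--         if d >= f:
--             return d
--         m = (d + f) // 2
--         if M <= TS[m][0]:
--             return lower(d, m)
--         return lower(m + 1, f)
--
--     def last(d, f, exist):
--         if d >= f:
--             return f, exist
--         m = (d + f) // 2
--         if TS[m][0][:lg] == M:
--             return last(m + 1, f, True)
--         return last(d, m - 1, exist)
--
--     deb = lower(0, n - 1)
--     fin, exist = last(deb, n - 1, False)
--     return TS[deb:fin + 1], exist
-- ===== Notes on version B (the rewrite author's own statement) =====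
-- stated objective: alternative
-- what changed: B builds the suffix table incrementally right-to-left, extending the previous suffix by one character and binary-inserting each pair into an always-sorted table (no separate build-all-then-timsort pass), and performs the two occurrence searches as recursive functions over the stored suffix strings instead of iterative loops that re-slice T.
import Mathlib
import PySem

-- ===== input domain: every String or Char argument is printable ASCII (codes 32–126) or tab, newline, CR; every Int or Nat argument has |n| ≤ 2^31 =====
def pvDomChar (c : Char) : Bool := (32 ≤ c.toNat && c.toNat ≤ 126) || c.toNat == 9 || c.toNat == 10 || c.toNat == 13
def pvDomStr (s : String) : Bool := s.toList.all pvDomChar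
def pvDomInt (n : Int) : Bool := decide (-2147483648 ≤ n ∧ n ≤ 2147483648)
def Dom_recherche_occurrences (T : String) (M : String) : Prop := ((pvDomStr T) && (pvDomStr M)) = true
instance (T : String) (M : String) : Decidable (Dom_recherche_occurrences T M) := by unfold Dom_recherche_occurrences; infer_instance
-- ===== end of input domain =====

-- B replaces "build all suffix slices, timsort, iterative binary searches" by an incremental
-- right-to-left suffix build inserted into an always-sorted table, with recursive searches over
-- the stored suffix strings (objective: alternative decomposition, same exact results).

-- ===== PORT A =====
-- table_suffix: build [(text[i:], i) for i in range(len(text))], then tuple-sort it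
def tableSuffix (text : String) : List (String × Int) :=
  let suffixTable :=
    (PySem.List.pyRange 0 (PySem.Str.len text) 1).foldl
      (fun acc i => acc ++ [(PySem.Str.slice text (some i) none, i)]) []
  PySem.List.sorted2 suffixTable (fun p => p.1) (fun p => p.2)

-- first while-loop of A: while d < f: m=(d+f)//2; if M <= T[TS[m][1]:]: f=m else d=m+1
-- (fuel makes the loop structural; it is called with fuel > number of iterations)
def aLoop1 (T M : String) (TS : List (String × Int)) : Nat → Int → Int → Int
  | 0, d, _ => d
  | fuel + 1, d, f =>
    if d < f then
      if M ≤ PySem.Str.slice T (some (PySem.List.pyGetD TS (PySem.Int.floordiv (d + f) 2) ("", 0)).2) none then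
        aLoop1 T M TS fuel d (PySem.Int.floordiv (d + f) 2)
      else
        aLoop1 T M TS fuel (PySem.Int.floordiv (d + f) 2 + 1) f
    else d

-- second while-loop of A: while d < f: m=(d+f)//2; if M == T[TS[m][1]:TS[m][1]+lg]: exist=True; d=m+1 else f=m-1
def aLoop2 (T M : String) (TS : List (String × Int)) (lg : Int) : Nat → Int → Int → Bool → Int × Bool
  | 0, _, f, exist => (f, exist)
  | fuel + 1, d, f, exist =>
    if d < f then
      if M = PySem.Str.slice T (some (PySem.List.pyGetD TS (PySem.Int.floordiv (d + f) 2) ("", 0)).2)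
             (some ((PySem.List.pyGetD TS (PySem.Int.floordiv (d + f) 2) ("", 0)).2 + lg)) then
        aLoop2 T M TS lg fuel (PySem.Int.floordiv (d + f) 2 + 1) f true
      else
        aLoop2 T M TS lg fuel d (PySem.Int.floordiv (d + f) 2 - 1) exist
    else (f, exist)

def recherche_occurrences (T : String) (M : String) : (List (String × Int)) × Bool :=
  let n := PySem.Str.len T
  let TS := tableSuffix T
  let deb := aLoop1 T M TS ((n - 1).toNat + 1) 0 (n - 1)
  let fe := aLoop2 T M TS (PySem.Str.len M) ((n - 1 - deb).toNat + 1) deb (n - 1) false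
  (PySem.List.slice TS (some deb) (some (fe.1 + 1)), fe.2)

-- ===== PORT B =====
-- inner while of B: lo, hi = 0, len(TS); while lo < hi: mid=(lo+hi)//2; if TS[mid][0] < s: lo=mid+1 else: hi=mid
def bScan (TS : List (String × Int)) (s : String) : Nat → Int → Int → Int
  | 0, lo, _ => lo
  | fuel + 1, lo, hi =>
    if lo < hi then
      if (PySem.List.pyGetD TS (PySem.Int.floordiv (lo + hi) 2) ("", 0)).1 < s then
        bScan TS s fuel (PySem.Int.floordiv (lo + hi) 2 + 1) hi
      else
        bScan TS s fuel lo (PySem.Int.floordiv (lo + hi) 2)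
    else lo

-- def lower(d, f): recursive lower-bound search over the STORED suffix strings
def bLower (M : String) (TS : List (String × Int)) : Nat → Int → Int → Int
  | 0, d, _ => d
  | fuel + 1, d, f =>
    if d < f then
      if M ≤ (PySem.List.pyGetD TS (PySem.Int.floordiv (d + f) 2) ("", 0)).1 then
        bLower M TS fuel d (PySem.Int.floordiv (d + f) 2)
      else
        bLower M TS fuel (PySem.Int.floordiv (d + f) 2 + 1) f
    else d

-- def last(d, f, exist): recursive search comparing TS[m][0][:lg] with M
def bLast (M : String) (lg : Int) (TS : List (String × Int)) : Nat → Int → Int → Bool → Int × Bool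
  | 0, _, f, exist => (f, exist)
  | fuel + 1, d, f, exist =>
    if d < f then
      if PySem.Str.slice (PySem.List.pyGetD TS (PySem.Int.floordiv (d + f) 2) ("", 0)).1 none (some lg) = M then
        bLast M lg TS fuel (PySem.Int.floordiv (d + f) 2 + 1) f true
      else
        bLast M lg TS fuel d (PySem.Int.floordiv (d + f) 2 - 1) exist
    else (f, exist)

-- loop body of B: s = T[i] + s; TS.insert(scan position, (s, i))
def bStep (T : String) (st : String × List (String × Int)) (i : Int) : String × List (String × Int) :=
  let s := String.ofList (((PySem.Str.pyGet? T i).getD ' ') :: st.1.toList)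
  (s, PySem.List.insert st.2 (bScan st.2 s (st.2.length + 1) 0 (st.2.length : Int)) (s, i))

-- main B: for i in range(n-1,-1,-1): s = T[i] + s; TS.insert(scan position, (s, i))
def recherche_occurrences_alt (T : String) (M : String) : (List (String × Int)) × Bool :=
  let n := PySem.Str.len T
  let lg := PySem.Str.len M
  let st := (PySem.List.pyRange (n - 1) (-1) (-1)).foldl (bStep T) ("", [])
  let TS := st.2
  let deb := bLower M TS ((n - 1).toNat + 1) 0 (n - 1)
  let fe := bLast M lg TS ((n - 1 - deb).toNat + 1) deb (n - 1) false
  (PySem.List.slice TS (some deb) (some (fe.1 + 1)), fe.2)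

-- ===== PRECONDITION & SPEC =====
def Spec_recherche_occurrences (T : String) (M : String) (out : (List (String × Int)) × Bool) : Prop := out = recherche_occurrences_alt T M
instance (T : String) (M : String) (out : (List (String × Int)) × Bool) : Decidable (Spec_recherche_occurrences T M out) := by unfold Spec_recherche_occurrences; infer_instance

-- ===== CLAIM (what is proved, stated in full; the proofs are below) =====
def Claim_equal_recherche_occurrences : Prop := ∀ (T : String) (M : String), Dom_recherche_occurrences T M → Spec_recherche_occurrences T M (recherche_occurrences T M)

-- ===== LEMMAS AND PROOFS =====

-- the i-th suffix of T, and the unsorted suffix table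
def pvSuf (T : String) (i : Nat) : String := String.ofList (T.toList.drop i)
def pvBase (T : String) : List (String × Int) :=
  (List.range T.toList.length).map (fun i => (pvSuf T i, (i : Int)))

-- sorted2's comparison for a (String × Int) tuple sort
def pvBefore (a b : String × Int) : Bool :=
  decide (a.1 < b.1) || !decide (b.1 < a.1) && decide (a.2 < b.2)

lemma pvSuf_len_lt {T : String} {i j : Nat} (hi : i < T.toList.length) (hij : i < j) :
    (pvSuf T j).toList.length < (pvSuf T i).toList.length := by
  simp only [pvSuf, String.toList_ofList, List.length_drop]; omega

lemma pvSuf_ne {T : String} {i j : Nat} (hi : i < T.toList.length) (hij : i < j) :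
    pvSuf T j ≠ pvSuf T i := by
  intro h
  have := pvSuf_len_lt hi hij
  rw [h] at this; omega

lemma pvBase_nodup (T : String) : (pvBase T).Nodup := by
  refine (List.nodup_range).map ?_
  intro i j h
  exact Nat.cast_injective (congrArg Prod.snd h)

-- sorted2 unfolds to insertion with pvBefore
lemma sorted2_eq_foldl (xs : List (String × Int)) :
    PySem.List.sorted2 xs (fun p => p.1) (fun p => p.2) =
      xs.foldl (fun acc x => PySem.List.insertBy pvBefore x acc) [] := by
  rfl

lemma pvBefore_asymm {a b : String × Int} (h : pvBefore a b = true) : pvBefore b a = false := by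
  simp only [pvBefore, Bool.or_eq_true, Bool.and_eq_true, Bool.not_eq_true',
    decide_eq_true_eq, decide_eq_false_iff_not] at h
  simp only [pvBefore, Bool.or_eq_false_iff, Bool.and_eq_false_iff, Bool.not_eq_false',
    decide_eq_false_iff_not, decide_eq_true_eq]
  rcases h with h | ⟨h1, h2⟩
  · exact ⟨asymm h, Or.inl h⟩
  · exact ⟨h1, Or.inr (by omega)⟩

lemma pvBefore_trans {a b c : String × Int} (h1 : pvBefore a b = true) (h2 : pvBefore b c = true) :
    pvBefore a c = true := by
  simp only [pvBefore, Bool.or_eq_true, Bool.and_eq_true, Bool.not_eq_true',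
    decide_eq_true_eq, decide_eq_false_iff_not] at h1 h2 ⊢
  rcases h1 with h1 | ⟨h1, h1'⟩ <;> rcases h2 with h2 | ⟨h2, h2'⟩
  · exact Or.inl (lt_trans h1 h2)
  · exact Or.inl (lt_of_lt_of_le h1 (le_of_not_gt h2))
  · exact Or.inl (lt_of_le_of_lt (le_of_not_gt h1) h2)
  · exact Or.inr ⟨fun h => h2 (lt_of_lt_of_le h (le_of_not_gt h1)), by omega⟩

lemma pvBefore_total {a b : String × Int} (hne : a ≠ b) (h : pvBefore a b = false) :
    pvBefore b a = true := by
  simp only [pvBefore, Bool.or_eq_false_iff, Bool.and_eq_false_iff, Bool.not_eq_false',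
    decide_eq_false_iff_not, decide_eq_true_eq] at h
  simp only [pvBefore, Bool.or_eq_true, Bool.and_eq_true, Bool.not_eq_true',
    decide_eq_true_eq, decide_eq_false_iff_not]
  obtain ⟨h1, h2⟩ := h
  by_cases hba : b.1 < a.1
  · exact Or.inl hba
  · have heq : a.1 = b.1 := le_antisymm (le_of_not_gt hba) (le_of_not_gt h1)
    have hsnd : a.2 ≠ b.2 := fun he => hne (Prod.ext heq he)
    rcases h2 with h2 | h2
    · exact absurd h2 hba
    · exact Or.inr ⟨fun hh => h1 hh, by omega⟩

-- sortedness of insertion sort with pvBefore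
lemma insertBy_pairwise {x : String × Int} {acc : List (String × Int)}
    (hs : acc.Pairwise (fun a b => pvBefore b a = false)) :
    (PySem.List.insertBy pvBefore x acc).Pairwise (fun a b => pvBefore b a = false) := by
  induction acc with
  | nil => simp [PySem.List.insertBy]
  | cons y ys ih =>
    rw [List.pairwise_cons] at hs
    obtain ⟨hy, hys⟩ := hs
    show (if pvBefore x y then x :: y :: ys else y :: PySem.List.insertBy pvBefore x ys).Pairwise _
    split_ifs with hxy
    · refine List.pairwise_cons.mpr ⟨?_, List.pairwise_cons.mpr ⟨hy, hys⟩⟩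
      intro z hz
      rcases List.mem_cons.mp hz with rfl | hz
      · exact pvBefore_asymm hxy
      · by_contra hzx
        have hzx' : pvBefore z x = true := by
          cases hzt : pvBefore z x
          · exact absurd hzt hzx
          · rfl
        exact absurd (pvBefore_trans hzx' hxy) (by simp [hy z hz])
    · refine List.pairwise_cons.mpr ⟨?_, ih hys⟩
      intro z hz
      rcases (PySem.List.mem_insertBy pvBefore x z ys).mp hz with hz | hz
      · subst hz
        cases hxt : pvBefore z y
        · rfl
        · exact absurd hxt (by simpa using hxy)
      · exact hy z hz

lemma foldl_insertBy_pairwise (xs : List (String × Int)) :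
    (xs.foldl (fun acc x => PySem.List.insertBy pvBefore x acc) []).Pairwise
      (fun a b => pvBefore b a = false) := by
  suffices h : ∀ acc : List (String × Int), acc.Pairwise (fun a b => pvBefore b a = false) →
      (xs.foldl (fun acc x => PySem.List.insertBy pvBefore x acc) acc).Pairwise
        (fun a b => pvBefore b a = false) from h [] (by simp)
  induction xs with
  | nil => intro acc hacc; simpa using hacc
  | cons x xs ih =>
    intro acc hacc
    exact ih _ (insertBy_pairwise hacc)

-- bScan counts the leading entries with first component < s
-- entries surviving the scan are strictly above the new suffix
lemma mem_dropWhile_gt {TS : List (String × Int)} {s : String}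
    (hs : TS.Pairwise (fun a b => a.1 < b.1))
    (hne : ∀ q ∈ TS, q.1 ≠ s) :
    ∀ r ∈ TS.dropWhile (fun q => decide (q.1 < s)), s < r.1 := by
  induction TS with
  | nil => simp
  | cons c rest ih =>
    rw [List.pairwise_cons] at hs
    obtain ⟨hc, hrest⟩ := hs
    rw [List.dropWhile_cons]
    split_ifs with h
    · exact ih hrest (fun q hq => hne q (List.mem_cons_of_mem _ hq))
    · simp only [decide_eq_true_eq] at h
      have hcs : s < c.1 :=
        lt_of_le_of_ne (le_of_not_gt h) (fun he => hne c (List.mem_cons_self) he.symm)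
      intro r hr
      rcases List.mem_cons.mp hr with rfl | hr
      · exact hcs
      · exact lt_trans hcs (hc r hr)

-- on a sorted table (s not among the firsts), each index is below the takeWhile
-- boundary exactly when its first component is < s
lemma takeWhile_boundary (TS : List (String × Int)) (s : String)
    (hs : TS.Pairwise (fun a b => a.1 < b.1)) (hne : ∀ q ∈ TS, q.1 ≠ s) :
    ∀ k (hk : k < TS.length),
      (k < (TS.takeWhile (fun q => decide (q.1 < s))).length ↔ TS[k].1 < s) := by
  intro k hk
  set tw := TS.takeWhile (fun q => decide (q.1 < s)) with htw
  set dw := TS.dropWhile (fun q => decide (q.1 < s)) with hdw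
  have hsplit : TS = tw ++ dw := (List.takeWhile_append_dropWhile).symm
  constructor
  · intro hkw
    have h1 : TS[k] = tw[k]'hkw :=
      (List.getElem_of_eq hsplit hk).trans (List.getElem_append_left hkw)
    have := List.mem_takeWhile_imp (List.getElem_mem hkw)
    rw [h1]
    simpa using this
  · intro hks
    by_contra hkw
    have hkw' : tw.length ≤ k := Nat.le_of_not_lt hkw
    have hklen : k - tw.length < dw.length := by
      have := congrArg List.length hsplit
      simp at this
      omega
    have h1 : TS[k] = dw[k - tw.length]'hklen :=
      (List.getElem_of_eq hsplit hk).trans (List.getElem_append_right hkw')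
    have hgt := mem_dropWhile_gt hs hne _ (List.getElem_mem hklen)
    rw [h1] at hks
    exact absurd hks (asymm hgt)

-- the binary scan finds the takeWhile boundary on a sorted table
lemma bScan_spec (TS : List (String × Int)) (s : String)
    (hs : TS.Pairwise (fun a b => a.1 < b.1)) (hne : ∀ q ∈ TS, q.1 ≠ s) :
    bScan TS s (TS.length + 1) 0 (TS.length : Int) =
      ((TS.takeWhile (fun q => decide (q.1 < s))).length : Int) := by
  set w := (TS.takeWhile (fun q => decide (q.1 < s))).length with hw
  have hwlen : w ≤ TS.length := (List.takeWhile_sublist _).length_le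
  have hiff := takeWhile_boundary TS s hs hne
  suffices haux : ∀ (fuel : Nat) (lo hi : Int), (hi - lo).toNat < fuel → 0 ≤ lo →
      hi ≤ (TS.length : Int) → lo ≤ (w : Int) → (w : Int) ≤ hi →
      bScan TS s fuel lo hi = (w : Int) from
    haux (TS.length + 1) 0 (TS.length : Int) (by omega) le_rfl le_rfl (by omega) (by omega)
  intro fuel
  induction fuel with
  | zero => intro lo hi hN; omega
  | succ fuel ih =>
    intro lo hi hN h0 hlen hlow hhigh
    by_cases h : lo < hi
    · have h2 : PySem.Int.floordiv (lo + hi) 2 = (lo + hi) / 2 :=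
        PySem.Int.floordiv_eq_ediv_of_pos (by norm_num)
      have hm0 : 0 ≤ PySem.Int.floordiv (lo + hi) 2 := by omega
      have hmhi : PySem.Int.floordiv (lo + hi) 2 < hi := by omega
      have hmlen : PySem.Int.floordiv (lo + hi) 2 < (TS.length : Int) := by omega
      have hkn : (PySem.Int.floordiv (lo + hi) 2).toNat < TS.length := by omega
      have hcond := hiff (PySem.Int.floordiv (lo + hi) 2).toNat hkn
      rw [bScan, if_pos h, PySem.List.pyGetD_eq_getElem TS ("", 0) hm0 hmlen]
      by_cases hc : TS[(PySem.Int.floordiv (lo + hi) 2).toNat].1 < s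
      · rw [if_pos hc]
        have : (PySem.Int.floordiv (lo + hi) 2).toNat < w := hcond.mpr hc
        exact ih _ hi (by omega) (by omega) hlen (by omega) hhigh
      · rw [if_neg hc]
        have : ¬ (PySem.Int.floordiv (lo + hi) 2).toNat < w := fun hh => hc (hcond.mp hh)
        exact ih lo _ (by omega) h0 (by omega) hlow (by omega)
    · rw [bScan, if_neg h]
      omega

-- inserting at the scanned position keeps the table sorted and adds the new pair
lemma insert_scan (TS : List (String × Int)) (p : String × Int)
    (hs : TS.Pairwise (fun a b => a.1 < b.1))
    (hne : ∀ q ∈ TS, q.1 ≠ p.1) :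
    (PySem.List.insert TS (bScan TS p.1 (TS.length + 1) 0 (TS.length : Int)) p).Perm (p :: TS) ∧
    (PySem.List.insert TS (bScan TS p.1 (TS.length + 1) 0 (TS.length : Int)) p).Pairwise (fun a b => a.1 < b.1) := by
  have hlen : (TS.takeWhile (fun q => decide (q.1 < p.1))).length ≤ TS.length :=
    (List.takeWhile_sublist _).length_le
  rw [bScan_spec TS p.1 hs hne, PySem.List.insert_natCast TS _ p hlen]
  set tw := TS.takeWhile (fun q => decide (q.1 < p.1)) with htw
  set dw := TS.dropWhile (fun q => decide (q.1 < p.1)) with hdw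
  have hsplit : TS = tw ++ dw := (List.takeWhile_append_dropWhile).symm
  have htake : TS.take tw.length = tw := by rw [hsplit, List.take_left]
  have hdrop : TS.drop tw.length = dw := by rw [hsplit, List.drop_left]
  rw [htake, hdrop]
  constructor
  · calc (tw ++ p :: dw).Perm (p :: (tw ++ dw)) := List.perm_middle
      _ = p :: TS := by rw [← hsplit]
  · have hs' : (tw ++ dw).Pairwise (fun a b => a.1 < b.1) := by rw [← hsplit]; exact hs
    rw [List.pairwise_append] at hs'
    obtain ⟨htws, hdws, hcross⟩ := hs'
    have hdwgt : ∀ r ∈ dw, p.1 < r.1 := mem_dropWhile_gt hs hne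
    have htwlt : ∀ q ∈ tw, q.1 < p.1 := by
      intro q hq
      simpa using List.mem_takeWhile_imp hq
    rw [List.pairwise_append]
    refine ⟨htws, List.pairwise_cons.mpr ⟨hdwgt, hdws⟩, ?_⟩
    intro a ha b hb
    rcases List.mem_cons.mp hb with rfl | hb
    · exact htwlt a ha
    · exact hcross a ha b hb

lemma slice_from_eq_suf (T : String) (i : Nat) :
    PySem.Str.slice T (some (i : Int)) none = pvSuf T i := by
  apply String.toList_inj.mp
  rw [PySem.Str.toList_slice]
  simp [PySem.Chars.slice, PySem.List.slice_from_natCast, pvSuf]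

-- A's unsorted suffix table is pvBase
lemma tableSuffix_eq_sorted2_base (T : String) :
    tableSuffix T = PySem.List.sorted2 (pvBase T) (fun p => p.1) (fun p => p.2) := by
  unfold tableSuffix
  rw [PySem.Str.len_eq, PySem.List.pyRange_zero_natCast,
    PySem.List.foldl_append_singleton_eq_map]
  simp only [List.nil_append, List.map_map]
  congr 1
  apply List.map_congr_left
  intro i _
  simp [Function.comp, slice_from_eq_suf T i]

lemma pyRange_down (n : Nat) :
    PySem.List.pyRange ((n:Int) - 1) (-1) (-1) =
      (List.range n).map (fun k : Nat => ((n:Int) - 1 - (k:Int))) := by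
  unfold PySem.List.pyRange
  rcases n with _ | m
  · norm_num
  · have hne : ¬((-1:Int) = 0) := by norm_num
    have hpos : ¬((0:Int) < -1) := by norm_num
    have hlt : (-1:Int) < (↑(m+1):Int) - 1 := by omega
    rw [if_neg hne]
    simp only [if_neg hpos, if_pos hlt]
    have hcnt : ((↑(m+1):Int) - 1 - -1 + - -1 - 1) / - -1 = ((m:Int)+1) := by
      push_cast; omega
    rw [hcnt]
    have h1 : ((m:Int)+1).toNat = m+1 := by omega
    rw [h1]
    apply List.map_congr_left
    intro k hk
    push_cast
    ring

-- invariant of B's insertion loop: after j steps, s is the suffix at n-j and the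
-- table is a sorted permutation of the suffix pairs for indices n-j .. n-1
lemma bFold_aux (T : String) : ∀ j : Nat, j ≤ T.toList.length →
    ∃ TSj : List (String × Int),
      ((List.range j).map (fun k : Nat => ((T.toList.length:Int) - 1 - (k:Int)))).foldl
          (bStep T) ("", []) = (pvSuf T (T.toList.length - j), TSj) ∧
      TSj.Perm (((List.range j).map (fun k => T.toList.length - j + k)).map
        (fun i => (pvSuf T i, (i : Int)))) ∧
      TSj.Pairwise (fun a b => a.1 < b.1) := by
  intro j
  induction j with
  | zero =>
    intro _
    refine ⟨[], ?_, by simp, by simp⟩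
    simp [pvSuf]
  | succ j ih =>
    intro hj1
    obtain ⟨TSj, hst, hperm, hpw⟩ := ih (by omega)
    set n := T.toList.length with hn
    have hi0 : n - 1 - j < n := by omega
    have hfold : (List.range (j+1)).map (fun k : Nat => ((n:Int) - 1 - (k:Int))) =
        (List.range j).map (fun k : Nat => ((n:Int) - 1 - (k:Int))) ++ [(n:Int) - 1 - (j:Int)] := by
      rw [List.range_succ, List.map_append, List.map_cons, List.map_nil]
    have hcast : (n:Int) - 1 - (j:Int) = ((n - 1 - j : Nat) : Int) := by omega
    have hs : String.ofList (((PySem.Str.pyGet? T ((n - 1 - j : Nat) : Int)).getD ' ') ::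
        (pvSuf T (n - j)).toList) = pvSuf T (n - 1 - j) := by
      have hget : PySem.Str.pyGet? T ((n - 1 - j : Nat) : Int) = some (T.toList[n-1-j]) := by
        simp
      rw [hget]
      simp only [Option.getD_some, pvSuf, String.toList_ofList]
      have hnj : n - j = (n - 1 - j) + 1 := by omega
      rw [hnj, ← List.drop_eq_getElem_cons hi0]
    have hnechar : ∀ q ∈ TSj, q.1 ≠ pvSuf T (n - 1 - j) := by
      intro q hq
      have hq' := hperm.subset hq
      simp only [List.mem_map, List.mem_range] at hq'
      obtain ⟨k, hk, hqeq⟩ := hq'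
      rw [← hqeq]
      exact pvSuf_ne hi0 (by omega)
    obtain ⟨hinsperm, hinspw⟩ :=
      insert_scan TSj (pvSuf T (n - 1 - j), ((n - 1 - j : Nat) : Int)) hpw hnechar
    refine ⟨PySem.List.insert TSj (bScan TSj (pvSuf T (n - 1 - j)) (TSj.length + 1) 0 (TSj.length : Int))
      (pvSuf T (n - 1 - j), ((n - 1 - j : Nat) : Int)), ?_, ?_, ?_⟩
    · rw [hfold, List.foldl_append, hst]
      simp only [List.foldl_cons, List.foldl_nil]
      rw [hcast]
      show bStep T (pvSuf T (n - j), TSj) ((n - 1 - j : Nat) : Int) = _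
      simp only [bStep, hs]
      have hIdx : n - (j + 1) = n - 1 - j := by omega
      rw [hIdx]
    · refine hinsperm.trans ?_
      have htgt : ((List.range (j+1)).map (fun k => n - (j+1) + k)).map
          (fun i => (pvSuf T i, (i : Int))) =
          (pvSuf T (n - 1 - j), ((n - 1 - j : Nat) : Int)) ::
            ((List.range j).map (fun k => n - j + k)).map (fun i => (pvSuf T i, (i : Int))) := by
        rw [List.range_succ_eq_map]
        simp only [List.map_cons, List.map_map]
        have h0 : n - (j + 1) + 0 = n - 1 - j := by omega
        rw [h0]
        congr 1
        apply List.map_congr_left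
        intro k hk
        simp only [Function.comp]
        have : n - (j + 1) + Nat.succ k = n - j + k := by omega
        rw [this]
      rw [htgt]
      exact hinsperm.symm.trans (hinsperm.trans (List.Perm.cons _ hperm))
    · exact hinspw

-- B's fold builds a sorted permutation of pvBase
lemma bFold_inv (T : String) :
    ∃ TSB : List (String × Int),
      ((PySem.List.pyRange ((PySem.Str.len T) - 1) (-1) (-1)).foldl (bStep T) ("", [])).2 = TSB ∧
      TSB.Perm (pvBase T) ∧ TSB.Pairwise (fun a b => a.1 < b.1) := by
  rw [PySem.Str.len_eq, pyRange_down]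
  obtain ⟨TSB, hst, hperm, hpw⟩ := bFold_aux T T.toList.length le_rfl
  refine ⟨TSB, by rw [hst], ?_, hpw⟩
  refine hperm.trans ?_
  have h1 : (List.range T.toList.length).map
      (fun k => T.toList.length - T.toList.length + k) = List.range T.toList.length := by
    have := List.map_congr_left (l := List.range T.toList.length)
      (f := fun k => T.toList.length - T.toList.length + k) (g := id) (fun a _ => by simp)
    rw [this, List.map_id]
  rw [h1]
  exact List.Perm.refl _

-- every entry of a permutation of pvBase is (T[i:], i)
lemma mem_base_char {T : String} {p : String × Int} (hp : p ∈ pvBase T) :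
    ∃ i : Nat, i < T.toList.length ∧ p = (pvSuf T i, (i : Int)) := by
  simp only [pvBase, List.mem_map, List.mem_range] at hp
  obtain ⟨i, hi, hp⟩ := hp
  exact ⟨i, hi, hp.symm⟩

-- the two tables coincide
lemma tables_eq (T : String) :
    tableSuffix T =
      ((PySem.List.pyRange ((PySem.Str.len T) - 1) (-1) (-1)).foldl (bStep T) ("", [])).2 := by
  obtain ⟨TSB, hst, hpermB, hpwB⟩ := bFold_inv T
  rw [hst, tableSuffix_eq_sorted2_base]
  have hperm1 : (PySem.List.sorted2 (pvBase T) (fun p => p.1) (fun p => p.2)).Perm (pvBase T) :=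
    PySem.List.sorted2_perm _ _ _ _
  have hnd1 : (PySem.List.sorted2 (pvBase T) (fun p => p.1) (fun p => p.2)).Nodup :=
    (hperm1.symm).nodup (pvBase_nodup T)
  have hpw1 : (PySem.List.sorted2 (pvBase T) (fun p => p.1) (fun p => p.2)).Pairwise
      (fun a b => pvBefore b a = false) := by
    rw [sorted2_eq_foldl]
    exact foldl_insertBy_pairwise (pvBase T)
  have hstrict1 : (PySem.List.sorted2 (pvBase T) (fun p => p.1) (fun p => p.2)).Pairwise
      (fun a b => a.1 < b.1) := by
    refine List.Pairwise.imp_of_mem ?_ (hpw1.and hnd1)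
    intro a b ha hb hab
    obtain ⟨hfa, hne⟩ := hab
    have hab' := pvBefore_total (fun h => hne h.symm) hfa
    simp only [pvBefore, Bool.or_eq_true, Bool.and_eq_true, Bool.not_eq_true',
      decide_eq_true_eq, decide_eq_false_iff_not] at hab'
    rcases hab' with h | ⟨h1, h2⟩
    · exact h
    · obtain ⟨i, hi, hpa⟩ := mem_base_char (hperm1.subset ha)
      obtain ⟨i', hi', hpb⟩ := mem_base_char (hperm1.subset hb)
      subst hpa; subst hpb
      simp only at h1 h2 ⊢
      have hii : i < i' := by exact_mod_cast h2
      exact lt_of_le_of_ne (le_of_not_gt h1) (Ne.symm (pvSuf_ne hi hii))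
  exact List.Perm.eq_of_pairwise
    (fun a b _ _ h1 h2 => absurd h2 (asymm h1)) hstrict1 hpwB
    (hperm1.trans hpermB.symm)

-- the searches agree on any table whose entries are suffix/index pairs
lemma loop1_eq (T M : String) (TS : List (String × Int))
    (hchar : ∀ p ∈ TS, ∃ i : Nat, i < T.toList.length ∧ p = (pvSuf T i, (i : Int))) :
    ∀ (fuel : Nat) (d f : Int), 0 ≤ d → f ≤ (TS.length : Int) - 1 →
      aLoop1 T M TS fuel d f = bLower M TS fuel d f := by
  intro fuel
  induction fuel with
  | zero => intro d f _ _; rfl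
  | succ fuel ih =>
    intro d f hd hf
    by_cases h : d < f
    · have h2 : PySem.Int.floordiv (d + f) 2 = (d + f) / 2 :=
        PySem.Int.floordiv_eq_ediv_of_pos (by norm_num)
      have hm0 : 0 ≤ PySem.Int.floordiv (d + f) 2 := by omega
      have hmf : PySem.Int.floordiv (d + f) 2 < f := by omega
      have hmlen : PySem.Int.floordiv (d + f) 2 < (TS.length : Int) := by omega
      have hidx : (PySem.Int.floordiv (d + f) 2).toNat < TS.length := by omega
      obtain ⟨i, hi, hp⟩ := hchar _ (TS.getElem_mem hidx)
      rw [aLoop1, bLower, if_pos h, if_pos h,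
        PySem.List.pyGetD_eq_getElem TS ("", 0) hm0 hmlen, hp]
      simp only [slice_from_eq_suf T i]
      by_cases hc : M ≤ pvSuf T i
      · rw [if_pos hc, if_pos hc]
        exact ih d _ hd (by omega)
      · rw [if_neg hc, if_neg hc]
        exact ih _ f (by omega) hf
    · rw [aLoop1, bLower, if_neg h, if_neg h]

-- A's window T[i:i+lg] is the lg-prefix of the stored suffix
lemma slice_window_eq (T M : String) (i : Nat) :
    PySem.Str.slice T (some ((i:Nat) : Int)) (some (((i:Nat) : Int) + PySem.Str.len M)) =
      PySem.Str.slice (pvSuf T i) none (some (PySem.Str.len M)) := by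
  apply String.toList_inj.mp
  rw [PySem.Str.toList_slice, PySem.Str.toList_slice, PySem.Str.len_eq]
  simp only [PySem.Chars.slice]
  rw [PySem.List.slice_natCast_add, PySem.List.slice_to _ (by positivity)]
  simp [pvSuf]

lemma loop2_eq (T M : String) (TS : List (String × Int))
    (hchar : ∀ p ∈ TS, ∃ i : Nat, i < T.toList.length ∧ p = (pvSuf T i, (i : Int))) :
    ∀ (fuel : Nat) (d f : Int) (exist : Bool), 0 ≤ d → f ≤ (TS.length : Int) - 1 →
      aLoop2 T M TS (PySem.Str.len M) fuel d f exist =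
        bLast M (PySem.Str.len M) TS fuel d f exist := by
  intro fuel
  induction fuel with
  | zero => intro d f exist _ _; rfl
  | succ fuel ih =>
    intro d f exist hd hf
    by_cases h : d < f
    · have h2 : PySem.Int.floordiv (d + f) 2 = (d + f) / 2 :=
        PySem.Int.floordiv_eq_ediv_of_pos (by norm_num)
      have hm0 : 0 ≤ PySem.Int.floordiv (d + f) 2 := by omega
      have hmf : PySem.Int.floordiv (d + f) 2 < f := by omega
      have hmlen : PySem.Int.floordiv (d + f) 2 < (TS.length : Int) := by omega
      have hidx : (PySem.Int.floordiv (d + f) 2).toNat < TS.length := by omega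
      obtain ⟨i, hi, hp⟩ := hchar _ (TS.getElem_mem hidx)
      rw [aLoop2, bLast, if_pos h, if_pos h,
        PySem.List.pyGetD_eq_getElem TS ("", 0) hm0 hmlen, hp]
      simp only [slice_window_eq T M i]
      by_cases hc : PySem.Str.slice (pvSuf T i) none (some (PySem.Str.len M)) = M
      · rw [if_pos hc.symm, if_pos hc]
        exact ih _ f true (by omega) hf
      · rw [if_neg (fun hh => hc hh.symm), if_neg hc]
        exact ih d _ exist hd (by omega)
    · rw [aLoop2, bLast, if_neg h, if_neg h]

-- bLower never goes below its lower bound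
lemma bLower_nonneg (M : String) (TS : List (String × Int)) :
    ∀ (fuel : Nat) (d f : Int), 0 ≤ d → 0 ≤ bLower M TS fuel d f := by
  intro fuel
  induction fuel with
  | zero => intro d f hd; exact hd
  | succ fuel ih =>
    intro d f hd
    rw [bLower]
    split_ifs with h hc
    · exact ih d _ hd
    · have h2 : PySem.Int.floordiv (d + f) 2 = (d + f) / 2 :=
        PySem.Int.floordiv_eq_ediv_of_pos (by norm_num)
      exact ih _ f (by omega)
    · exact hd

-- ===== VERDICT (by name: the statement is the Claim_ definition above) =====
theorem recherche_occurrences_spec : Claim_equal_recherche_occurrences := by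
  intro T M _
  unfold Spec_recherche_occurrences
  simp only [recherche_occurrences, recherche_occurrences_alt]
  rw [← tables_eq T]
  have hperm : (tableSuffix T).Perm (pvBase T) := by
    rw [tableSuffix_eq_sorted2_base]
    exact PySem.List.sorted2_perm _ _ _ _
  have hchar : ∀ p ∈ tableSuffix T, ∃ i : Nat, i < T.toList.length ∧ p = (pvSuf T i, (i : Int)) :=
    fun p hp => mem_base_char (hperm.subset hp)
  have hlen : (tableSuffix T).length = T.toList.length := by
    rw [hperm.length_eq]
    simp [pvBase]
  have hn : PySem.Str.len T = ((tableSuffix T).length : Int) := by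
    rw [PySem.Str.len_eq, hlen]
  rw [hn]
  rw [loop1_eq T M (tableSuffix T) hchar _ 0 (((tableSuffix T).length : Int) - 1) le_rfl (by omega)]
  have hdeb0 : 0 ≤ bLower M (tableSuffix T)
      ((((tableSuffix T).length : Int) - 1).toNat + 1) 0 (((tableSuffix T).length : Int) - 1) :=
    bLower_nonneg M (tableSuffix T) _ 0 _ le_rfl
  rw [loop2_eq T M (tableSuffix T) hchar _ _ _ false hdeb0 (by omega)]
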